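-- pv_equiv track=rewrite | github.com/ziho9593/DLwithPython | APS/PROGRAMMERS/LEVEL_1/비밀지도.py | solution
-- ===== SOURCE A (Python) =====
-- def solution(n, arr1, arr2):
--     answer = []
--     for num1, num2 in zip(arr1, arr2):
--         num = bin(num1 | num2)[2:]
--         num = num.zfill(n)
--         num = num.replace('1', '#')
--         num = num.replace('0', ' ')
--         answer.append(num)
--     return answer
-- ===== SOURCE B (Python) =====
-- def solution(n, arr1, arr2):
--     answer = []
--     for num1, num2 in zip(arr1, arr2):
--         v = num1 | num2
--         width = max(n, v.bit_length(), 1)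
--         row = []
--         for j in range(width):
--             row.append('#' if (v >> (width - 1 - j)) & 1 else ' ')
--         answer.append(''.join(row))
--     return answer
-- ===== Notes on version B (the rewrite author's own statement) =====
-- stated objective: alternative
-- what changed: Each row is built character by character from bit tests on num1|num2 (shift-and-mask over width = max(n, bit_length, 1)) instead of the bin()/zfill()/replace() string pipeline.
-- outside the precondition, e.g. on solution(3, [-5], [0]): A returns ['b# #'], B returns [' ##']
import Mathlib
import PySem

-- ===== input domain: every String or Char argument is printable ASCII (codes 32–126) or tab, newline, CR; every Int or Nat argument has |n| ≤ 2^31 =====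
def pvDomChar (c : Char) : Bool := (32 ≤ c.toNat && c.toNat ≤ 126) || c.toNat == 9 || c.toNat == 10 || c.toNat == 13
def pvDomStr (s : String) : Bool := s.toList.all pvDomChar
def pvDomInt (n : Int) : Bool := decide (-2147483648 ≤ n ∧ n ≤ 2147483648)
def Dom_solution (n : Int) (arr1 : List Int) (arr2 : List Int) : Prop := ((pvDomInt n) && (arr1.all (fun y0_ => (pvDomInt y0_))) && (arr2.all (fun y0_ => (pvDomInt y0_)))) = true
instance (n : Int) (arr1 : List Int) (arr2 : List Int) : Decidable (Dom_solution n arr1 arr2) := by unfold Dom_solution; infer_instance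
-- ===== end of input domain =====

-- B builds each row character by character from bit tests on num1|num2 instead of A's
-- bin()/zfill()/replace() string pipeline; same cost, different decomposition ("alternative").

-- ===== PORT A =====
def solution (n : Int) (arr1 : List Int) (arr2 : List Int) : List String :=
  (arr1.zip arr2).map (fun p =>
    let num := PySem.Str.slice (PySem.Int.pyBin (PySem.Int.bor p.1 p.2)) (some 2) none
    let num := PySem.Str.zfill num n
    let num := PySem.Str.replace num "1" "#"
    let num := PySem.Str.replace num "0" " "
    num)

-- ===== PORT B =====
def solution_alt (n : Int) (arr1 : List Int) (arr2 : List Int) : List String :=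
  (arr1.zip arr2).map (fun p =>
    let v := PySem.Int.bor p.1 p.2
    let width := max n (max (PySem.Int.bitLength v : Int) 1)
    String.ofList ((List.range width.toNat).map (fun j =>
      if PySem.Int.band (v >>> (width.toNat - 1 - j)) 1 == 1 then '#' else ' ')))

-- ===== PRECONDITION & SPEC =====
-- Pre_ excludes inputs where a zipped pair contains a negative number: there A's bin(v)[2:]
-- leaves a stray 'b'/'-' inside the row while B reads two's-complement bits — both values are
-- accidents of the mechanism on a corner no map encoding specifies.
def Pre_solution (n : Int) (arr1 : List Int) (arr2 : List Int) : Prop :=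
  ∀ p ∈ arr1.zip arr2, 0 ≤ p.1 ∧ 0 ≤ p.2
instance (n : Int) (arr1 : List Int) (arr2 : List Int) : Decidable (Pre_solution n arr1 arr2) := by unfold Pre_solution; infer_instance

def pvWitness_solution : Int × List Int × List Int := (5, [9, 20, 28, 18, 11], [30, 1, 21, 17, 28])

def Spec_solution (n : Int) (arr1 : List Int) (arr2 : List Int) (out : List String) : Prop := out = solution_alt n arr1 arr2
instance (n : Int) (arr1 : List Int) (arr2 : List Int) (out : List String) : Decidable (Spec_solution n arr1 arr2 out) := by unfold Spec_solution; infer_instance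

-- ===== CLAIM (what is proved, stated in full; the proofs are below) =====
def Claim_equal_solution : Prop := ∀ (n : Int) (arr1 : List Int) (arr2 : List Int), Dom_solution n arr1 arr2 → Pre_solution n arr1 arr2 → Spec_solution n arr1 arr2 (solution n arr1 arr2)

-- ===== LEMMAS AND PROOFS =====

-- msb-first binary digits of m, without the special case for 0 (bd 0 = [])
def bd (m : Nat) : List Char :=
  if h : m = 0 then [] else bd (m / 2) ++ [Nat.digitChar (m % 2)]
decreasing_by exact Nat.bitwise_rec_lemma h

-- bin(m)[2:] as a list of chars: the digits, with '0' for m = 0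
def digs (m : Nat) : List Char := if m = 0 then ['0'] else bd m

-- B's row seen at the char level: char j tests bit (w-1-j) of m
def bitC (m k : Nat) : Char := if m / 2 ^ k % 2 = 1 then '1' else '0'
def F (m w : Nat) : List Char := (List.range w).map (fun j => bitC m (w - 1 - j))

def BL (m : Nat) : Nat := PySem.Int.bitLength (m : Int)

theorem digs_zero : digs 0 = ['0'] := by rw [digs]; simp

theorem digs_one : digs 1 = ['1'] := by
  rw [digs]; simp only [one_ne_zero, if_false]
  rw [bd]; simp only [one_ne_zero, dif_neg, ne_eq, not_false_eq_true]
  norm_num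
  rw [bd]; simp [Nat.digitChar]

theorem toDigitsCore_succ (b f n : Nat) (rest : List Char) :
    Nat.toDigitsCore b (f + 1) n rest =
      if n / b = 0 then Nat.digitChar (n % b) :: rest
      else Nat.toDigitsCore b f (n / b) (Nat.digitChar (n % b) :: rest) := by
  conv_lhs => rw [Nat.toDigitsCore]

theorem toDigitsCore_eq (f : Nat) : ∀ (m : Nat) (rest : List Char), m < 2 ^ f →
    Nat.toDigitsCore 2 (f + 1) m rest = digs m ++ rest := by
  induction f with
  | zero =>
    intro m rest hm
    interval_cases m
    rw [toDigitsCore_succ, digs_zero]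
    simp [Nat.digitChar]
  | succ f ih =>
    intro m rest hm
    rw [toDigitsCore_succ]
    by_cases h2 : m / 2 = 0
    · simp only [h2, if_true]
      have : m < 2 := by omega
      interval_cases m
      · rw [digs_zero]; simp [Nat.digitChar]
      · rw [digs_one]; simp [Nat.digitChar]
    · simp only [h2, if_false]
      rw [ih (m / 2) _ (by omega)]
      have hm0 : m ≠ 0 := by omega
      have hd : digs m = digs (m / 2) ++ [Nat.digitChar (m % 2)] := by
        simp [digs, hm0, h2]; rw [bd]; simp [hm0]
      rw [hd, List.append_assoc]
      rfl

theorem toDigits_eq (m : Nat) : Nat.toDigits 2 m = digs m := by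
  have := toDigitsCore_eq m m [] (Nat.lt_two_pow_self)
  simpa [Nat.toDigits] using this

theorem length_bd (m : Nat) : (bd m).length = BL m := by
  induction m using Nat.strong_induction_on with
  | _ m ih =>
    by_cases h : m = 0
    · subst h; rw [bd]; simp [BL, PySem.Int.bitLength_zero]
    · rw [bd]; simp [h]
      rw [ih (m / 2) (by omega)]
      have := PySem.Int.bitLength_natCast (m := m) (by omega)
      simp [BL, this]

theorem one_le_BL (m : Nat) (h : m ≠ 0) : 1 ≤ BL m := by
  have := PySem.Int.bitLength_natCast (m := m) (by omega)
  simp [BL, this]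

theorem length_digs (m : Nat) : (digs m).length = max 1 (BL m) := by
  by_cases h : m = 0
  · subst h; simp [digs, BL, PySem.Int.bitLength_zero]
  · simp [digs, h, length_bd, Nat.max_eq_right (one_le_BL m h)]

theorem mem_digs (m : Nat) : ∀ c ∈ digs m, c = '0' ∨ c = '1' := by
  have hbd : ∀ m, ∀ c ∈ bd m, c = '0' ∨ c = '1' := by
    intro m
    induction m using Nat.strong_induction_on with
    | _ m ih =>
      intro c hc
      by_cases h : m = 0
      · subst h; rw [bd] at hc; simp at hc
      · rw [bd] at hc; simp [h] at hc
        rcases hc with hc | hc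
        · exact ih (m / 2) (by omega) c hc
        · have h2 : m % 2 = 0 ∨ m % 2 = 1 := by omega
          rcases h2 with h2 | h2 <;> simp [hc, h2, Nat.digitChar]
  intro c hc
  by_cases h : m = 0
  · simp [digs, h] at hc; simp [hc]
  · simp [digs, h] at hc; exact hbd m c hc

theorem F_succ_append (m w : Nat) : F m (w + 1) = F (m / 2) w ++ [bitC m 0] := by
  simp only [F, List.range_succ, List.map_append, List.map]
  congr 1
  · apply List.map_congr_left
    intro j hj
    simp only [List.mem_range] at hj
    have h1 : w + 1 - 1 - j = (w - 1 - j) + 1 := by omega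
    rw [h1]
    simp only [bitC]
    rw [Nat.div_div_eq_div_mul, ← Nat.pow_succ']
  · simp

theorem F_succ_cons (m w : Nat) : F m (w + 1) = bitC m w :: F m w := by
  apply List.ext_getElem
  · simp [F]
  · intro i hi1 hi2
    simp only [F, List.getElem_map, List.getElem_range]
    cases i with
    | zero =>
      simp only [List.getElem_cons_zero]
      have h0 : w + 1 - 1 - 0 = w := by omega
      rw [h0]
    | succ i =>
      simp only [List.getElem_cons_succ, F, List.getElem_map, List.getElem_range]
      congr 1
      simp only [F, List.length_map] at hi2
      omega

theorem F_eq_bd (m : Nat) : F m (BL m) = bd m := by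
  induction m using Nat.strong_induction_on with
  | _ m ih =>
    by_cases h : m = 0
    · subst h; rw [bd]; simp [BL, PySem.Int.bitLength_zero, F]
    · have hstep := PySem.Int.bitLength_natCast (m := m) (by omega)
      have hBL : BL m = BL (m / 2) + 1 := by simp [BL, hstep]
      rw [hBL, F_succ_append, ih (m / 2) (by omega)]
      conv_rhs => rw [bd]
      simp only [h, dif_neg, not_false_eq_true]
      congr 1
      simp only [bitC, pow_zero, Nat.div_one]
      have h2 : m % 2 = 0 ∨ m % 2 = 1 := by omega
      rcases h2 with h2 | h2 <;> simp [h2, Nat.digitChar]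

theorem F_succ_pad (m w : Nat) (hw : BL m ≤ w) : F m (w + 1) = '0' :: F m w := by
  rw [F_succ_cons]
  have hlt : m < 2 ^ w := by
    have h1 : m < 2 ^ BL m := by
      have := PySem.Int.lt_two_pow_bitLength (m : Int)
      simpa [BL] using this
    exact lt_of_lt_of_le h1 (Nat.pow_le_pow_right (by norm_num) hw)
  have hz : m / 2 ^ w = 0 := Nat.div_eq_of_lt hlt
  simp [bitC, hz]

theorem F_pad (m k : Nat) : F m (max 1 (BL m) + k) = List.replicate k '0' ++ digs m := by
  induction k with
  | zero =>
    simp only [Nat.add_zero, List.replicate_zero, List.nil_append]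
    by_cases h : m = 0
    · subst h
      rw [digs_zero]
      simp [BL, PySem.Int.bitLength_zero, F, bitC]
    · rw [Nat.max_eq_right (one_le_BL m h), F_eq_bd]
      simp [digs, h]
  | succ k ih =>
    rw [show max 1 (BL m) + (k + 1) = (max 1 (BL m) + k) + 1 from rfl,
        F_succ_pad m _ (by omega), ih]
    simp [List.replicate_succ]

-- single-char replace is a map
theorem replace_go_single (o n' : Char) :
    ∀ (l : List Char) (acc : List Char),
      PySem.Chars.replace.go [o] [n'] l.length l acc =
        acc.reverse ++ l.map (fun c => if c = o then n' else c) := by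
  intro l
  induction l with
  | nil => intro acc; simp [PySem.Chars.replace.go]
  | cons c t ih =>
    intro acc
    simp only [List.length_cons, PySem.Chars.replace.go]
    by_cases h : c = o
    · subst h
      have hpre : List.isPrefixOf [c] (c :: t) = true := by simp [List.isPrefixOf]
      simp only [hpre, if_true, List.drop_succ_cons,
        List.length_nil, List.drop_zero]
      rw [show List.reverse [n'] ++ acc = n' :: acc from rfl, ih]
      simp
    · have hpre : List.isPrefixOf [o] (c :: t) = false := by
        simp [List.isPrefixOf]; exact fun hh => absurd hh.symm h
      simp only [hpre, Bool.false_eq_true, if_false]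
      rw [ih]
      simp [h]

theorem replace_single (s : List Char) (o n' : Char) :
    PySem.Chars.replace s [o] [n'] = s.map (fun c => if c = o then n' else c) := by
  rw [PySem.Chars.replace]
  simp only [List.isEmpty_cons, Bool.false_eq_true, if_false]
  simpa using replace_go_single o n' s []

theorem zfill_digs (m : Nat) (n : Int) :
    PySem.Chars.zfill (digs m) n =
      List.replicate (max n.toNat (digs m).length - (digs m).length) '0' ++ digs m := by
  rw [PySem.Chars.zfill.eq_def]
  by_cases h : n ≤ ((digs m).length : Int)
  · simp only [h, if_true]
    have : max n.toNat (digs m).length = (digs m).length := by omega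
    simp [this]
  · simp only [h, if_false]
    have hlen : 0 < (digs m).length := by
      rw [length_digs]; omega
    rcases hds : digs m with _ | ⟨c, rest⟩
    · simp [hds] at hlen
    · have hc : c = '0' ∨ c = '1' := mem_digs m c (by rw [hds]; exact List.mem_cons_self)
      have hsign : ¬ (c = '+' ∨ c = '-') := by
        rcases hc with hc | hc <;> simp [hc]
      simp only [hsign, if_false]
      have hmax : max n.toNat (digs m).length = n.toNat := by omega
      rw [← hds, hmax]

theorem pv_str_ext (s t : String) (h : s.toList = t.toList) : s = t := by
  have := congrArg String.ofList h
  simpa [String.ofList_toList] using this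

-- the row produced for one pair, for a nonnegative OR value ↑m
theorem row_eq (n : Int) (m : Nat) :
    PySem.Str.replace (PySem.Str.replace
        (PySem.Str.zfill (PySem.Str.slice (PySem.Int.pyBin (m : Int)) (some 2) none) n)
        "1" "#") "0" " " =
    String.ofList ((List.range (max n (max (PySem.Int.bitLength (m : Int) : Int) 1)).toNat).map
      (fun j => if PySem.Int.band ((m : Int) >>> ((max n (max (PySem.Int.bitLength (m : Int) : Int) 1)).toNat - 1 - j)) 1 == 1 then '#' else ' ')) := by
  have hwv : (max n (max (PySem.Int.bitLength (m : Int) : Int) 1)).toNat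
      = max n.toNat (max 1 (BL m)) := by
    simp only [BL]; omega
  -- A's string, reduced to the char level
  have hslice : PySem.Chars.slice (PySem.Int.pyBin (m : Int)).toList (some 2) none = digs m := by
    rw [PySem.Int.toList_pyBin, PySem.Chars.slice_eq_listSlice,
        PySem.List.slice_from _ (by norm_num : (0:Int) ≤ 2)]
    simp only [PySem.Int.toBinChars0b]
    have : ¬ ((m : Int) < 0) := by simp
    simp only [this, if_false]
    simp [toDigits_eq]
  apply pv_str_ext
  rw [PySem.Str.toList_replace, PySem.Str.toList_replace, PySem.Str.toList_zfill,
      PySem.Str.toList_slice, hslice, zfill_digs,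
      show ("1" : String).toList = ['1'] from rfl,
      show ("#" : String).toList = ['#'] from rfl,
      show ("0" : String).toList = ['0'] from rfl,
      show (" " : String).toList = [' '] from rfl,
      replace_single, replace_single, String.toList_ofList, hwv]
  have hpad : List.replicate (max n.toNat (digs m).length - (digs m).length) '0' ++ digs m
      = F m (max n.toNat (max 1 (BL m))) := by
    have hL : (digs m).length = max 1 (BL m) := length_digs m
    have hsplit : max n.toNat (max 1 (BL m))
        = max 1 (BL m) + (max n.toNat (max 1 (BL m)) - max 1 (BL m)) := by omega
    rw [hsplit, F_pad, hL]
  rw [hpad]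
  simp only [F, List.map_map]
  apply List.map_congr_left
  intro j hj
  simp only [Function.comp_apply]
  set k := max n.toNat (max 1 (BL m)) - 1 - j with hk
  -- the bit test, at the Nat level
  have hsh : ((m : Int) >>> k) = ((m >>> k : Nat) : Int) := by
    simp [Int.natCast_shiftRight]
  have hband : PySem.Int.band ((m : Int) >>> k) 1 = ((m >>> k) &&& 1 : Nat) := by
    rw [hsh, show ((1:Int)) = ((1:Nat):Int) from rfl, PySem.Int.band_natCast]
  have hmod : (m >>> k) &&& 1 = m / 2 ^ k % 2 := by
    rw [Nat.and_one_is_mod, Nat.shiftRight_eq_div_pow]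
  have h2 : m / 2 ^ k % 2 = 0 ∨ m / 2 ^ k % 2 = 1 := by omega
  rcases h2 with h2 | h2 <;>
    simp [bitC, hband, hmod, h2]

-- ===== VERDICT (by name: the statement is the Claim_ definition above) =====
theorem solution_spec : Claim_equal_solution := by
  intro n arr1 arr2 _ hpre
  unfold Spec_solution solution solution_alt
  apply List.map_congr_left
  intro p hp
  obtain ⟨h1, h2⟩ := hpre p hp
  simp only []
  rw [PySem.Int.bor_of_nonneg h1 h2]
  exact row_eq n (p.1.toNat ||| p.2.toNat)
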